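-- pv_equiv track=rewrite | github.com/murilomonte/atv-tds | 3P/POT/rev-funcoes/q010.py | max
-- ===== SOURCE A (Python) =====
-- def max(n1: int, n2: int, n3: int, n4: int) -> int:
--     if n1 == n2 == n3 == n4:
--         return n1
--     lista: list[int] = [n1, n2, n3, n4]
--     maior: int = lista[0]
--     for i in lista:
--         if i > maior:
--             maior = i
--     return maior
-- ===== SOURCE B (Python) =====
-- def max(n1: int, n2: int, n3: int, n4: int) -> int:
--     return sorted([n1, n2, n3, n4])[-1]
-- ===== Notes on version B (the rewrite author's own statement) =====
-- stated objective: idiomatic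
-- what changed: Replaces the all-equal guard plus running-maximum scan with sorting the four values and returning the last element.
import Mathlib
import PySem

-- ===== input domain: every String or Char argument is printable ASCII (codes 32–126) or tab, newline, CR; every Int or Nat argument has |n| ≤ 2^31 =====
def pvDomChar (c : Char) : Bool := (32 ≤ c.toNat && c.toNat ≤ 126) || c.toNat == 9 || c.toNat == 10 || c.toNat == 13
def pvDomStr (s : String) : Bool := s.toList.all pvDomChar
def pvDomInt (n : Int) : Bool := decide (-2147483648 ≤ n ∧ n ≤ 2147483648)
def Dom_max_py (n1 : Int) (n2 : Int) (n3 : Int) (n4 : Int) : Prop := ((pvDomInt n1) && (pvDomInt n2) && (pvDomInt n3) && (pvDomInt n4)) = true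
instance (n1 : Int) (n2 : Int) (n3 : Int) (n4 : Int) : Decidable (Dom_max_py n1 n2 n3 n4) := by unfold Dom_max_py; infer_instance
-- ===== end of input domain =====

-- B replaces A's all-equal guard and running-maximum scan with sort-then-take-last (idiomatic; same result).


-- ===== PORT A =====
-- all-equal guard, then a running-maximum scan over the list (literal port of A)
def max_py (n1 : Int) (n2 : Int) (n3 : Int) (n4 : Int) : Int :=
  if n1 = n2 ∧ n2 = n3 ∧ n3 = n4 then n1
  else
    let lista : List Int := [n1, n2, n3, n4]
    let maior : Int := PySem.List.pyGetD lista 0 0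
    lista.foldl (fun maior i => if i > maior then i else maior) maior

-- ===== PORT B =====
-- B: sort the four values and take the last element (sorted(...)[-1]; list nonempty, getD default unreachable)
def max_py_alt (n1 : Int) (n2 : Int) (n3 : Int) (n4 : Int) : Int :=
  ((PySem.List.pyGet? (PySem.List.sorted [n1, n2, n3, n4] id false) (-1)).getD 0)

-- ===== PRECONDITION & SPEC =====
def Spec_max_py (n1 : Int) (n2 : Int) (n3 : Int) (n4 : Int) (out : Int) : Prop := out = max_py_alt n1 n2 n3 n4
instance (n1 : Int) (n2 : Int) (n3 : Int) (n4 : Int) (out : Int) : Decidable (Spec_max_py n1 n2 n3 n4 out) := by unfold Spec_max_py; infer_instance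

-- ===== CLAIM (what is proved, stated in full; the proofs are below) =====
def Claim_equal_max_py : Prop := ∀ (n1 : Int) (n2 : Int) (n3 : Int) (n4 : Int), Dom_max_py n1 n2 n3 n4 → Spec_max_py n1 n2 n3 n4 (max_py n1 n2 n3 n4)

-- ===== LEMMAS AND PROOFS =====

-- ===== VERDICT (by name: the statement is the Claim_ definition above) =====
-- A's guard-plus-scan computes the join of the four values
lemma max_py_eq_sup (n1 n2 n3 n4 : Int) : max_py n1 n2 n3 n4 = n1 ⊔ n2 ⊔ n3 ⊔ n4 := by
  simp only [max_py, PySem.List.pyGetD, List.foldl]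
  split_ifs <;> simp_all <;> omega

-- the last element of the sorted list is an upper bound of, and a member of, the list
lemma max_py_alt_eq_sup (n1 n2 n3 n4 : Int) : max_py_alt n1 n2 n3 n4 = n1 ⊔ n2 ⊔ n3 ⊔ n4 := by
  unfold max_py_alt
  set s := PySem.List.sorted [n1, n2, n3, n4] id false with hs
  have hlen : s.length = 4 := by rw [hs]; simp [PySem.List.length_sorted]
  have hne : s ≠ [] := by intro h; simp [h] at hlen
  rw [PySem.List.pyGet?_neg_one, List.getLast?_eq_getLast_of_ne_nil hne]
  simp only [Option.getD_some]
  have hmemiff : ∀ x, x ∈ s ↔ x ∈ [n1, n2, n3, n4] := fun x => PySem.List.mem_sorted _ _ _ _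
  have hpw : s.Pairwise (fun a b => id a ≤ id b) := PySem.List.sorted_pairwise _ _
  have hub : ∀ y ∈ s, y ≤ s.getLast hne := by
    intro y hy
    rcases List.getElem_of_mem hy with ⟨i, hi, rfl⟩
    rw [List.getLast_eq_getElem]
    rcases Nat.lt_or_ge i (s.length - 1) with h | h
    · exact (List.pairwise_iff_getElem.mp hpw) i (s.length - 1) hi (by omega) h
    · have : i = s.length - 1 := by omega
      simp [this]
  have hmem : s.getLast hne ∈ [n1, n2, n3, n4] := (hmemiff _).mp (List.getLast_mem hne)
  have h1 := hub n1 ((hmemiff n1).mpr (by simp))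
  have h2 := hub n2 ((hmemiff n2).mpr (by simp))
  have h3 := hub n3 ((hmemiff n3).mpr (by simp))
  have h4 := hub n4 ((hmemiff n4).mpr (by simp))
  simp only [List.mem_cons, List.not_mem_nil, or_false] at hmem
  rcases hmem with h | h | h | h <;> simp only [h, le_antisymm_iff, le_max_iff, max_le_iff] at * <;> omega

-- ===== VERDICT (by name: the statement is the Claim_ definition above) =====
theorem max_py_spec : Claim_equal_max_py := by
  intro n1 n2 n3 n4 _
  unfold Spec_max_py
  rw [max_py_eq_sup, max_py_alt_eq_sup]
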